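-- pv_equiv track=rewrite | github.com/Chord-West/Algorithm | PythonAlgorithm/Programmers/고득점kit/탐욕법/체육복.py | solution
-- ===== SOURCE A (Python) =====
-- def solution(n, lost, reserve):
--     answer = 0
--     people = [1] * n
--     dx = [-1, 1]
--     for r in reserve:
--         people[r - 1] += 1
--     for l in lost:
--         people[l - 1] -= 1
--     for i in range(n):
--         if people[i] == 2:
--             for x in dx:
--                 nx = i + x
--                 if 0 <= nx < n and people[nx] == 0 and people[i] == 2:
--                     people[nx] += 1
--                     people[i] -= 1
--     for p in people:
--         if p > 0:
--             answer += 1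
--
--     return answer
-- ===== SOURCE B (Python) =====
-- def solution(n, lost, reserve):
--     people = [1] * n
--     for r in reserve:
--         people[r - 1] += 1
--     for l in lost:
--         people[l - 1] -= 1
--     answer = 0
--     prev = None
--     for v in people:
--         if prev is not None:
--             if prev == 2 and v == 0:
--                 prev, v = 1, 1
--             if v == 2 and prev == 0:
--                 prev, v = 1, 1
--             if prev > 0:
--                 answer += 1
--         prev = v
--     if prev is not None and prev > 0:
--         answer += 1
--     return answer
-- ===== Notes on version B (the rewrite author's own statement) =====
-- stated objective: alternative
-- what changed: Replaces A's random-access greedy pass (in-place neighbor mutation via people[i-1]/people[i+1] index arithmetic) plus a separate final recount pass with a single streaming left-to-right scan over the counts carrying O(1) state (previous cell's value and a running answer), with no array writes and no index arithmetic in the main loop.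
import Mathlib
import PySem

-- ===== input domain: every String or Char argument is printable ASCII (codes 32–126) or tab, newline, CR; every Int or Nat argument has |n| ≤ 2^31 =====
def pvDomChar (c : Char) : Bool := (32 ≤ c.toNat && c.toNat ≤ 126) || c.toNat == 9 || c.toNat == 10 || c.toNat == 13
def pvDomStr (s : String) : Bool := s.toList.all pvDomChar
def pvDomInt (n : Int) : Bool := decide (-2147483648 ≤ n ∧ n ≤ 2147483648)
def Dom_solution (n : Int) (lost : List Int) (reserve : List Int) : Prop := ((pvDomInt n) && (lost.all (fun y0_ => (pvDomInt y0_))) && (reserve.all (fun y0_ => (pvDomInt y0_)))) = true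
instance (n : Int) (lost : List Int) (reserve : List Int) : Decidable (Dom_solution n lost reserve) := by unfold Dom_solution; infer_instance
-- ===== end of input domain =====

-- B replaces A's in-place neighbor-mutation pass and final recount with one streaming
-- scan carrying O(1) state (alternative algorithm, same cost); equal wherever A returns.

-- ===== PORT A =====
def solution (n : Int) (lost : List Int) (reserve : List Int) : Int :=
  let people0 : List Int := List.replicate n.toNat 1
  let people1 := reserve.foldl (fun ps r =>
      PySem.List.pySetD ps (r - 1) (PySem.List.pyGetD ps (r - 1) 0 + 1)) people0
  let people2 := lost.foldl (fun ps l =>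
      PySem.List.pySetD ps (l - 1) (PySem.List.pyGetD ps (l - 1) 0 - 1)) people1
  let people3 := (PySem.List.pyRange 0 n 1).foldl (fun ps i =>
      if PySem.List.pyGetD ps i 0 = 2 then
        ([(-1 : Int), 1]).foldl (fun ps x =>
          let nx := i + x
          if 0 ≤ nx ∧ nx < n ∧ PySem.List.pyGetD ps nx 0 = 0 ∧ PySem.List.pyGetD ps i 0 = 2 then
            let ps1 := PySem.List.pySetD ps nx (PySem.List.pyGetD ps nx 0 + 1)
            PySem.List.pySetD ps1 i (PySem.List.pyGetD ps1 i 0 - 1)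
          else ps) ps
      else ps) people2
  people3.foldl (fun acc p => if p > 0 then acc + 1 else acc) 0

-- ===== PORT B =====
def solution_alt (n : Int) (lost : List Int) (reserve : List Int) : Int :=
  let people0 : List Int := List.replicate n.toNat 1
  let people1 := reserve.foldl (fun ps r =>
      PySem.List.pySetD ps (r - 1) (PySem.List.pyGetD ps (r - 1) 0 + 1)) people0
  let people2 := lost.foldl (fun ps l =>
      PySem.List.pySetD ps (l - 1) (PySem.List.pyGetD ps (l - 1) 0 - 1)) people1
  let res := people2.foldl (fun s v =>
      match s.2 with
      | none => (s.1, some v)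
      | some p =>
        let pv1 := if p = 2 ∧ v = 0 then ((1 : Int), (1 : Int)) else (p, v)
        let pv2 := if pv1.2 = 2 ∧ pv1.1 = 0 then ((1 : Int), (1 : Int)) else pv1
        (s.1 + if pv2.1 > 0 then 1 else 0, some pv2.2)) ((0 : Int), (none : Option Int))
  match res.2 with
  | none => res.1
  | some p => res.1 + if p > 0 then 1 else 0

-- ===== PRECONDITION & SPEC =====
-- Pre_ is exactly the set of inputs on which the Python A returns normally: every student
-- number x in lost and reserve must make x-1 a valid Python index into the length-n list
-- (i.e. 1-n ≤ x ≤ n); outside it A raises IndexError.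
def Pre_solution (n : Int) (lost : List Int) (reserve : List Int) : Prop :=
  (∀ x ∈ lost, 1 - n ≤ x ∧ x ≤ n) ∧ (∀ x ∈ reserve, 1 - n ≤ x ∧ x ≤ n)
instance (n : Int) (lost : List Int) (reserve : List Int) : Decidable (Pre_solution n lost reserve) := by
  unfold Pre_solution; infer_instance

def pvWitness_solution : Int × List Int × List Int := (3, [2], [1, 3])

def Spec_solution (n : Int) (lost : List Int) (reserve : List Int) (out : Int) : Prop := out = solution_alt n lost reserve
instance (n : Int) (lost : List Int) (reserve : List Int) (out : Int) : Decidable (Spec_solution n lost reserve out) := by unfold Spec_solution; infer_instance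

-- ===== CLAIM (what is proved, stated in full; the proofs are below) =====
def Claim_equal_solution : Prop := ∀ (n : Int) (lost : List Int) (reserve : List Int), Dom_solution n lost reserve → Pre_solution n lost reserve → Spec_solution n lost reserve (solution n lost reserve)

-- ===== LEMMAS AND PROOFS =====

-- named copies of the loop bodies / shared counts array of the two ports
-- (definitionally equal to the inline lambdas in the ports; used only by the proofs)
def pvFA (n : Int) : List Int → Int → List Int := fun ps i =>
  if PySem.List.pyGetD ps i 0 = 2 then
    ([(-1 : Int), 1]).foldl (fun ps x =>
      let nx := i + x
      if 0 ≤ nx ∧ nx < n ∧ PySem.List.pyGetD ps nx 0 = 0 ∧ PySem.List.pyGetD ps i 0 = 2 then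
        let ps1 := PySem.List.pySetD ps nx (PySem.List.pyGetD ps nx 0 + 1)
        PySem.List.pySetD ps1 i (PySem.List.pyGetD ps1 i 0 - 1)
      else ps) ps
  else ps

def pvStep : Int × Option Int → Int → Int × Option Int := fun s v =>
  match s.2 with
  | none => (s.1, some v)
  | some p =>
    let pv1 := if p = 2 ∧ v = 0 then ((1 : Int), (1 : Int)) else (p, v)
    let pv2 := if pv1.2 = 2 ∧ pv1.1 = 0 then ((1 : Int), (1 : Int)) else pv1
    (s.1 + if pv2.1 > 0 then 1 else 0, some pv2.2)

def pvFinal : Int × Option Int → Int := fun s =>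
  match s.2 with
  | none => s.1
  | some p => s.1 + if p > 0 then 1 else 0

def pvRes (p v : Int) : Int × Int := if p = 2 ∧ v = 0 then (1, 1) else (p, v)

def pvInit (n : Int) (lost : List Int) (reserve : List Int) : List Int :=
  lost.foldl (fun ps l =>
      PySem.List.pySetD ps (l - 1) (PySem.List.pyGetD ps (l - 1) 0 - 1))
    (reserve.foldl (fun ps r =>
      PySem.List.pySetD ps (r - 1) (PySem.List.pyGetD ps (r - 1) 0 + 1))
    (List.replicate n.toNat 1))

lemma solution_unfold (n : Int) (lost : List Int) (reserve : List Int) :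
    solution n lost reserve =
      ((PySem.List.pyRange 0 n 1).foldl (pvFA n) (pvInit n lost reserve)).foldl
        (fun acc p => if p > 0 then acc + 1 else acc) 0 := rfl

lemma solution_alt_unfold (n : Int) (lost : List Int) (reserve : List Int) :
    solution_alt n lost reserve =
      pvFinal ((pvInit n lost reserve).foldl pvStep ((0 : Int), (none : Option Int))) := rfl

lemma pv_getD_set (ps : List Int) (m j : Nat) (v : Int) :
    (ps.set m v).getD j 0 = if m = j ∧ m < ps.length then v else ps.getD j 0 := by
  simp only [List.getD_eq_getElem?_getD, List.getElem?_set]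
  split_ifs with h1 h2 h3 h3 <;> simp_all <;> omega

lemma pv_adjust_len (c : Int) (xs : List Int) : ∀ ps : List Int,
    (xs.foldl (fun ps r =>
      PySem.List.pySetD ps (r - 1) (PySem.List.pyGetD ps (r - 1) 0 + c)) ps).length = ps.length := by
  induction xs with
  | nil => intro ps; rfl
  | cons x xs ih =>
    intro ps
    simp only [List.foldl_cons, ih, PySem.List.length_pySetD]

lemma pv_sub_fold (xs : List Int) (ps : List Int) :
    xs.foldl (fun ps l =>
      PySem.List.pySetD ps (l - 1) (PySem.List.pyGetD ps (l - 1) 0 - 1)) ps =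
    xs.foldl (fun ps l =>
      PySem.List.pySetD ps (l - 1) (PySem.List.pyGetD ps (l - 1) 0 + (-1))) ps := by
  have h : (fun (ps : List Int) (l : Int) =>
      PySem.List.pySetD ps (l - 1) (PySem.List.pyGetD ps (l - 1) 0 - 1)) =
      (fun ps l => PySem.List.pySetD ps (l - 1) (PySem.List.pyGetD ps (l - 1) 0 + (-1))) := by
    funext ps l; simp [sub_eq_add_neg]
  rw [h]

lemma pv_init_len (n : Int) (lost reserve : List Int) :
    (pvInit n lost reserve).length = n.toNat := by
  unfold pvInit
  rw [pv_sub_fold, pv_adjust_len, pv_adjust_len, List.length_replicate]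

lemma pv_fa_len (n : Int) (ps : List Int) (i : Int) : (pvFA n ps i).length = ps.length := by
  unfold pvFA
  split_ifs
  · simp only [List.foldl_cons, List.foldl_nil]
    split_ifs <;> simp [PySem.List.length_pySetD]
  · rfl

lemma pv_faf_len (n : Int) : ∀ (l : List Int) (ps : List Int),
    (l.foldl (pvFA n) ps).length = ps.length := by
  intro l
  induction l with
  | nil => intro ps; rfl
  | cons x xs ih => intro ps; simp only [List.foldl_cons, ih, pv_fa_len]

lemma pv_map_getD_range (xs : List Int) :
    (List.range xs.length).map (fun k => xs.getD k 0) = xs := by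
  apply List.ext_getElem
  · simp
  · intro i h1 h2
    simp [List.getD_eq_getElem?_getD, List.getElem?_eq_getElem h2]

lemma pv_countP_eq_range (xs : List Int) (p : Int → Bool) :
    xs.countP p = (List.range xs.length).countP (fun k => p (xs.getD k 0)) := by
  conv_lhs => rw [← pv_map_getD_range xs]
  rw [List.countP_map]
  rfl

lemma pv_sim (n : Int) (orig : List Int) (hlen : orig.length = n.toNat) (k : Nat) :
    ∀ (i : Nat) (ps : List Int) (acc : Int) (p : Int),
    1 ≤ i → (i : Int) + k = n →
    ps.length = orig.length →
    acc = ((List.range (i - 1)).countP (fun j => decide (ps.getD j 0 > 0)) : Int) →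
    (i < orig.length →
      ps.getD (i - 1) 0 = (pvRes p (orig.getD i 0)).1 ∧
      ps.getD i 0 = (pvRes p (orig.getD i 0)).2) →
    (i = orig.length → ps.getD (i - 1) 0 = p) →
    (∀ j : Nat, i + 1 ≤ j → ps.getD j 0 = orig.getD j 0) →
    pvFinal ((orig.drop i).foldl pvStep (acc, some p)) =
      (((List.range n.toNat).countP
        (fun j => decide (((PySem.List.pyRange (i : Int) n 1).foldl (pvFA n) ps).getD j 0 > 0))) : Int) := by
  induction k with
  | zero =>
    intro i ps acc p hi1 hk hplen hacc hR2 hterm _hR3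
    have hieq : i = orig.length := by omega
    have hdrop : orig.drop i = [] := by rw [hieq, List.drop_length]
    have hrng : PySem.List.pyRange (i : Int) n 1 = [] := PySem.List.pyRange_one_eq_nil (by omega)
    rw [hdrop, hrng, List.foldl_nil, List.foldl_nil]
    have hsucc : n.toNat = (i - 1) + 1 := by omega
    rw [hsucc, List.range_succ, List.countP_append]
    have hp : ps.getD (i - 1) 0 = p := hterm hieq
    simp only [List.countP_cons, List.countP_nil, pvFinal, hp]
    rw [hacc]
    by_cases hpos : p > 0
    · simp [hpos]
    · simp [hpos]
  | succ k ih =>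
    intro i ps acc p hi1 hk hplen hacc hR2 hterm hR3
    have hilen : i < orig.length := by omega
    have hnn : (0 : Int) ≤ n := by omega
    set v := orig.getD i 0 with hv
    have hdrop : orig.drop i = v :: orig.drop (i + 1) := by
      rw [List.drop_eq_getElem_cons hilen]
      congr 1
      rw [hv, List.getD_eq_getElem orig 0 hilen]
    have hrng : PySem.List.pyRange (i : Int) n 1 = (i : Int) :: PySem.List.pyRange ((i : Int) + 1) n 1 :=
      PySem.List.pyRange_one_cons (by omega)
    rw [hdrop, hrng, List.foldl_cons, List.foldl_cons]
    obtain ⟨hg1, hg2⟩ := hR2 hilen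
    have hcast1 : ((i + 1 : Nat) : Int) = (i : Int) + 1 := by push_cast; ring
    have hstep : pvStep (acc, some p) v =
        (acc + if (if (pvRes p v).2 = 2 ∧ (pvRes p v).1 = 0 then ((1:Int),(1:Int)) else pvRes p v).1 > 0 then 1 else 0,
         some (if (pvRes p v).2 = 2 ∧ (pvRes p v).1 = 0 then ((1:Int),(1:Int)) else pvRes p v).2) := rfl
    set p1 := (pvRes p v).1 with hp1
    set c := (pvRes p v).2 with hc
    have hpc : pvRes p v = (p1, c) := rfl
    have hgetAi : PySem.List.pyGetD ps (i : Int) 0 = ps.getD i 0 := by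
      rw [PySem.List.pyGetD_of_nonneg _ _ (by omega)]; simp
    have hgetAim : PySem.List.pyGetD ps ((i : Int) + -1) 0 = ps.getD (i - 1) 0 := by
      rw [PySem.List.pyGetD_of_nonneg _ _ (by omega)]
      congr 1; omega
    have hgetAip : PySem.List.pyGetD ps ((i : Int) + 1) 0 = ps.getD (i + 1) 0 := by
      rw [PySem.List.pyGetD_of_nonneg _ _ (by omega)]
      have e : ((i : Int) + 1).toNat = i + 1 := by omega
      rw [e]
    by_cases hc2 : c = 2
    · -- current cell is a donor
      have hAon : pvFA n ps (i : Int) =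
          ([(-1 : Int), 1]).foldl (fun ps x =>
            let nx := (i : Int) + x
            if 0 ≤ nx ∧ nx < n ∧ PySem.List.pyGetD ps nx 0 = 0 ∧ PySem.List.pyGetD ps (i : Int) 0 = 2 then
              let ps1 := PySem.List.pySetD ps nx (PySem.List.pyGetD ps nx 0 + 1)
              PySem.List.pySetD ps1 (i : Int) (PySem.List.pyGetD ps1 (i : Int) 0 - 1)
            else ps) ps := by
        unfold pvFA
        rw [if_pos (by rw [hgetAi, hg2]; exact hc2)]
      by_cases hp0 : p1 = 0
      · -- CASE L: donate to the left neighbour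
        have hcondL : (0 ≤ (i : Int) + -1 ∧ (i : Int) + -1 < n ∧
            PySem.List.pyGetD ps ((i : Int) + -1) 0 = 0 ∧ PySem.List.pyGetD ps (i : Int) 0 = 2) :=
          ⟨by omega, by omega, by rw [hgetAim, hg1]; exact hp0, by rw [hgetAi, hg2]; exact hc2⟩
        have hps1 : PySem.List.pySetD ps ((i : Int) + -1) (PySem.List.pyGetD ps ((i : Int) + -1) 0 + 1) =
            ps.set (i - 1) 1 := by
          rw [PySem.List.pySetD_of_nonneg _ _ (by omega), hgetAim, hg1, hp0]
          have e : ((i : Int) + -1).toNat = i - 1 := by omega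
          rw [e]; norm_num
        have hgm : PySem.List.pyGetD (ps.set (i - 1) 1) (i : Int) 0 = 2 := by
          rw [PySem.List.pyGetD_of_nonneg _ _ (by omega)]
          simp only [Int.toNat_natCast]
          rw [pv_getD_set, if_neg (by omega)]
          rw [hg2]; exact hc2
        have hAval : pvFA n ps (i : Int) = (ps.set (i - 1) 1).set i 1 := by
          rw [hAon]
          simp only [List.foldl_cons, List.foldl_nil]
          rw [if_pos hcondL, hps1, hgm]
          have hg3 : PySem.List.pyGetD ((ps.set (i - 1) 1).set i (2 - 1)) (i : Int) 0 = 1 := by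
            rw [PySem.List.pyGetD_of_nonneg _ _ (by omega)]
            simp only [Int.toNat_natCast]
            rw [pv_getD_set, if_pos (by simp [hplen]; omega)]
            norm_num
          rw [PySem.List.pySetD_of_nonneg _ _ (by omega)]
          simp only [Int.toNat_natCast]
          rw [if_neg]
          · norm_num
          · rintro ⟨-, -, -, h⟩
            rw [hg3] at h; omega
        have hB2 : (if c = 2 ∧ p1 = 0 then ((1:Int),(1:Int)) else (p1, c)) = (1, 1) :=
          if_pos ⟨hc2, hp0⟩
        rw [hAval]
        rw [hstep]
        simp only [hpc, hB2]
        rw [← hcast1]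
        refine (ih (i + 1) ((ps.set (i - 1) 1).set i 1) (acc + if (1:Int) > 0 then 1 else 0) 1
          (by omega) (by omega) (by simp [hplen]) ?_ ?_ ?_ ?_)
        · -- R1'
          have hsucc : i + 1 - 1 = (i - 1) + 1 := by omega
          rw [hsucc, List.range_succ, List.countP_append]
          have hcongr : (List.range (i - 1)).countP
              (fun j => decide (((ps.set (i - 1) 1).set i 1).getD j 0 > 0)) =
              (List.range (i - 1)).countP (fun j => decide (ps.getD j 0 > 0)) := by
            refine List.countP_congr ?_
            intro j hj
            have hjlt : j < i - 1 := List.mem_range.mp hj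
            rw [pv_getD_set, if_neg (by omega), pv_getD_set, if_neg (by omega)]
          have hlast : ((ps.set (i - 1) 1).set i 1).getD (i - 1) 0 = 1 := by
            rw [pv_getD_set, if_neg (by omega), pv_getD_set, if_pos (by simp [hplen] <;> omega)]
          simp only [List.countP_cons, List.countP_nil, hcongr, hlast]
          rw [hacc]
          norm_num
        · -- R2'
          intro hlt
          have hgi : ((ps.set (i - 1) 1).set i 1).getD i 0 = 1 := by
            rw [pv_getD_set, if_pos (by simp [hplen]; omega)]
          have hgi1 : ((ps.set (i - 1) 1).set i 1).getD (i + 1) 0 = orig.getD (i + 1) 0 := by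
            rw [pv_getD_set, if_neg (by omega), pv_getD_set, if_neg (by omega)]
            exact hR3 (i + 1) (by omega)
          constructor
          · have e : i + 1 - 1 = i := by omega
            rw [e, hgi, pvRes, if_neg (by rintro ⟨h, -⟩; omega)]
          · rw [hgi1, pvRes, if_neg (by rintro ⟨h, -⟩; omega)]
        · -- terminal'
          intro hlt
          have e : i + 1 - 1 = i := by omega
          rw [e, pv_getD_set, if_pos (by simp [hplen]; omega)]
        · -- R3'
          intro j hj
          rw [pv_getD_set, if_neg (by omega), pv_getD_set, if_neg (by omega)]
          exact hR3 j (by omega)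
      · -- left neighbour not needy
        have hcondLfalse : ¬ (0 ≤ (i : Int) + -1 ∧ (i : Int) + -1 < n ∧
            PySem.List.pyGetD ps ((i : Int) + -1) 0 = 0 ∧ PySem.List.pyGetD ps (i : Int) 0 = 2) := by
          rintro ⟨-, -, hzz, -⟩
          rw [hgetAim, hg1] at hzz
          exact hp0 hzz
        have hB2 : (if c = 2 ∧ p1 = 0 then ((1:Int),(1:Int)) else (p1, c)) = (p1, c) :=
          if_neg (by rintro ⟨-, h⟩; exact hp0 h)
        by_cases hR : ((i : Int) + 1) < n ∧ orig.getD (i + 1) 0 = 0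
        · -- CASE R: donate to the right neighbour
          have hi1len : i + 1 < orig.length := by omega
          have hcondR : (0 ≤ (i : Int) + 1 ∧ (i : Int) + 1 < n ∧
              PySem.List.pyGetD ps ((i : Int) + 1) 0 = 0 ∧ PySem.List.pyGetD ps (i : Int) 0 = 2) :=
            ⟨by omega, hR.1, by rw [hgetAip, hR3 (i + 1) (by omega)]; exact hR.2, by rw [hgetAi, hg2]; exact hc2⟩
          have hps1 : PySem.List.pySetD ps ((i : Int) + 1) (PySem.List.pyGetD ps ((i : Int) + 1) 0 + 1) =
              ps.set (i + 1) 1 := by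
            rw [PySem.List.pySetD_of_nonneg _ _ (by omega), hgetAip, hR3 (i + 1) (by omega), hR.2]
            have e : ((i : Int) + 1).toNat = i + 1 := by omega
            rw [e]; norm_num
          have hgm : PySem.List.pyGetD (ps.set (i + 1) 1) (i : Int) 0 = 2 := by
            rw [PySem.List.pyGetD_of_nonneg _ _ (by omega)]
            simp only [Int.toNat_natCast]
            rw [pv_getD_set, if_neg (by omega)]
            rw [hg2]; exact hc2
          have hAval : pvFA n ps (i : Int) = (ps.set (i + 1) 1).set i 1 := by
            rw [hAon]
            simp only [List.foldl_cons, List.foldl_nil]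
            rw [if_neg hcondLfalse, if_pos hcondR, hps1, hgm]
            rw [PySem.List.pySetD_of_nonneg _ _ (by omega)]
            simp only [Int.toNat_natCast]
            norm_num
          rw [hAval]
          rw [hstep]
          simp only [hpc, hB2]
          rw [← hcast1]
          refine (ih (i + 1) ((ps.set (i + 1) 1).set i 1) (acc + if p1 > 0 then 1 else 0) c
            (by omega) (by omega) (by simp [hplen]) ?_ ?_ ?_ ?_)
          · -- R1'
            have hsucc : i + 1 - 1 = (i - 1) + 1 := by omega
            rw [hsucc, List.range_succ, List.countP_append]
            have hcongr : (List.range (i - 1)).countP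
                (fun j => decide (((ps.set (i + 1) 1).set i 1).getD j 0 > 0)) =
                (List.range (i - 1)).countP (fun j => decide (ps.getD j 0 > 0)) := by
              refine List.countP_congr ?_
              intro j hj
              have hjlt : j < i - 1 := List.mem_range.mp hj
              rw [pv_getD_set, if_neg (by omega), pv_getD_set, if_neg (by omega)]
            have hlast : ((ps.set (i + 1) 1).set i 1).getD (i - 1) 0 = p1 := by
              rw [pv_getD_set, if_neg (by omega), pv_getD_set, if_neg (by omega)]
              exact hg1
            simp only [List.countP_cons, List.countP_nil, hcongr, hlast]
            rw [hacc]
            by_cases hpos : p1 > 0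
            · simp [hpos]
            · simp [hpos]
          · -- R2'
            intro hlt
            have hgi : ((ps.set (i + 1) 1).set i 1).getD i 0 = 1 := by
              rw [pv_getD_set, if_pos (by simp [hplen]; omega)]
            have hgi1 : ((ps.set (i + 1) 1).set i 1).getD (i + 1) 0 = 1 := by
              rw [pv_getD_set, if_neg (by omega), pv_getD_set, if_pos (by simp [hplen]; omega)]
            constructor
            · have e : i + 1 - 1 = i := by omega
              rw [e, hgi, pvRes, if_pos ⟨hc2, hR.2⟩]
            · rw [hgi1, pvRes, if_pos ⟨hc2, hR.2⟩]
          · -- terminal' (impossible: the right neighbour exists)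
            intro hlt
            exact absurd hlt (by omega)
          · -- R3'
            intro j hj
            rw [pv_getD_set, if_neg (by omega), pv_getD_set, if_neg (by omega)]
            exact hR3 j (by omega)
        · -- CASE N2: donor but nobody to help
          have hcondRfalse : ¬ (0 ≤ (i : Int) + 1 ∧ (i : Int) + 1 < n ∧
              PySem.List.pyGetD ps ((i : Int) + 1) 0 = 0 ∧ PySem.List.pyGetD ps (i : Int) 0 = 2) := by
            rintro ⟨-, hlt, hzz, -⟩
            rw [hgetAip, hR3 (i + 1) (by omega)] at hzz
            exact hR ⟨hlt, hzz⟩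
          have hAval : pvFA n ps (i : Int) = ps := by
            rw [hAon]
            simp only [List.foldl_cons, List.foldl_nil]
            rw [if_neg hcondLfalse, if_neg hcondRfalse]
          rw [hAval]
          rw [hstep]
          simp only [hpc, hB2]
          rw [← hcast1]
          refine (ih (i + 1) ps (acc + if p1 > 0 then 1 else 0) c
            (by omega) (by omega) hplen ?_ ?_ ?_ ?_)
          · have hsucc : i + 1 - 1 = (i - 1) + 1 := by omega
            rw [hsucc, List.range_succ, List.countP_append]
            simp only [List.countP_cons, List.countP_nil, hg1]
            rw [hacc]
            by_cases hpos : p1 > 0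
            · simp [hpos]
            · simp [hpos]
          · intro hlt
            have hw : ps.getD (i + 1) 0 = orig.getD (i + 1) 0 := hR3 (i + 1) (by omega)
            have hwne : ¬ orig.getD (i + 1) 0 = 0 := by
              intro h0
              exact hR ⟨by omega, h0⟩
            constructor
            · have e : i + 1 - 1 = i := by omega
              rw [e, hg2, pvRes, if_neg (by rintro ⟨-, h⟩; exact hwne h)]
            · rw [hw, pvRes, if_neg (by rintro ⟨-, h⟩; exact hwne h)]
          · intro hlt
            have e : i + 1 - 1 = i := by omega
            rw [e, hg2]
          · intro j hj
            exact hR3 j (by omega)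
    · -- CASE N1: not a donor
      have hAval : pvFA n ps (i : Int) = ps := by
        unfold pvFA
        rw [if_neg (by rw [hgetAi, hg2]; exact hc2)]
      have hB2 : (if c = 2 ∧ p1 = 0 then ((1:Int),(1:Int)) else (p1, c)) = (p1, c) :=
        if_neg (by rintro ⟨h, -⟩; exact hc2 h)
      rw [hAval]
      rw [hstep]
      simp only [hpc, hB2]
      rw [← hcast1]
      refine (ih (i + 1) ps (acc + if p1 > 0 then 1 else 0) c
        (by omega) (by omega) hplen ?_ ?_ ?_ ?_)
      · have hsucc : i + 1 - 1 = (i - 1) + 1 := by omega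
        rw [hsucc, List.range_succ, List.countP_append]
        simp only [List.countP_cons, List.countP_nil, hg1]
        rw [hacc]
        by_cases hpos : p1 > 0
        · simp [hpos]
        · simp [hpos]
      · intro hlt
        have hw : ps.getD (i + 1) 0 = orig.getD (i + 1) 0 := hR3 (i + 1) (by omega)
        constructor
        · have e : i + 1 - 1 = i := by omega
          rw [e, hg2, pvRes, if_neg (by rintro ⟨h, -⟩; exact hc2 h)]
        · rw [hw, pvRes, if_neg (by rintro ⟨h, -⟩; exact hc2 h)]
      · intro hlt
        have e : i + 1 - 1 = i := by omega
        rw [e, hg2]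
      · intro j hj
        exact hR3 j (by omega)

theorem pv_main (n : Int) (orig : List Int) (hlen : orig.length = n.toNat) :
    ((PySem.List.pyRange 0 n 1).foldl (pvFA n) orig).foldl
        (fun acc p => if p > 0 then acc + 1 else acc) 0 =
      pvFinal (orig.foldl pvStep ((0 : Int), (none : Option Int))) := by
  by_cases hn : n ≤ 0
  · have h0 : orig = [] := List.eq_nil_of_length_eq_zero (by omega)
    rw [h0, PySem.List.pyRange_one_eq_nil hn]
    rfl
  · replace hn : 0 < n := by omega
    have hpos : 0 < orig.length := by omega
    set v0 := orig.getD 0 0 with hv0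
    have hdrop0 : orig = v0 :: orig.drop 1 := by
      have h := List.drop_eq_getElem_cons (l := orig) (i := 0) hpos
      rw [List.drop_zero] at h
      rw [hv0, List.getD_eq_getElem orig 0 hpos]
      exact h
    have hrng : PySem.List.pyRange 0 n 1 = (0 : Int) :: PySem.List.pyRange 1 n 1 := by
      have h := PySem.List.pyRange_one_cons (a := 0) (b := n) hn
      rw [h]; norm_num
    have hg0 : PySem.List.pyGetD orig (0 : Int) 0 = v0 := by
      rw [PySem.List.pyGetD_of_nonneg _ _ (by omega)]; rfl
    have hg1 : PySem.List.pyGetD orig ((0 : Int) + 1) 0 = orig.getD 1 0 := by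
      rw [PySem.List.pyGetD_of_nonneg _ _ (by omega)]; rfl
    -- characterize A's iteration 0 and establish the invariant at i = 1
    have hmain : ∀ (hfacts :
        (1 < orig.length →
          (pvFA n orig 0).getD 0 0 = (pvRes v0 (orig.getD 1 0)).1 ∧
          (pvFA n orig 0).getD 1 0 = (pvRes v0 (orig.getD 1 0)).2) ∧
        (1 = orig.length → (pvFA n orig 0).getD 0 0 = v0) ∧
        (∀ j : Nat, 2 ≤ j → (pvFA n orig 0).getD j 0 = orig.getD j 0) ∧
        (pvFA n orig 0).length = orig.length),
        ((PySem.List.pyRange 0 n 1).foldl (pvFA n) orig).foldl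
          (fun acc p => if p > 0 then acc + 1 else acc) 0 =
        pvFinal (orig.foldl pvStep ((0 : Int), (none : Option Int))) := by
      rintro ⟨hf2, hft, hf3, hflen⟩
      have hB0 : orig.foldl pvStep ((0 : Int), (none : Option Int)) =
          (orig.drop 1).foldl pvStep ((0 : Int), some v0) := by
        conv_lhs => rw [hdrop0]
        rfl
      have hcnt : ∀ xs : List Int,
          xs.foldl (fun acc p => if p > 0 then acc + 1 else acc) (0 : Int) =
            (xs.countP (fun p => decide (p > 0)) : Int) := by
        intro xs
        have h := PySem.List.foldl_count_if (fun p : Int => decide (p > 0)) xs 0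
        simpa using h
      have hsim := pv_sim n orig hlen (n.toNat - 1) 1 (pvFA n orig 0) 0 v0
        (le_refl 1) (by omega) (by rw [hflen]) (by simp)
        (fun h => hf2 h) hft (fun j hj => hf3 j hj)
      rw [hB0, hsim]
      rw [hrng, List.foldl_cons, hcnt, pv_countP_eq_range]
      have hflen2 : ((PySem.List.pyRange 1 n 1).foldl (pvFA n) (pvFA n orig 0)).length = n.toNat := by
        rw [pv_faf_len, hflen, hlen]
      rw [hflen2]
      norm_num
    refine hmain ?_
    by_cases h2 : v0 = 2
    · by_cases hnext : 1 < orig.length ∧ orig.getD 1 0 = 0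
      · -- iteration 0 donates to the right
        have hA1 : pvFA n orig 0 = (orig.set 1 1).set 0 1 := by
          unfold pvFA
          rw [if_pos (by rw [hg0]; exact h2)]
          simp only [List.foldl_cons, List.foldl_nil]
          have hcondm : ¬ (0 ≤ (0 : Int) + -1 ∧ (0 : Int) + -1 < n ∧
              PySem.List.pyGetD orig ((0 : Int) + -1) 0 = 0 ∧
              PySem.List.pyGetD orig (0 : Int) 0 = 2) := by
            rintro ⟨h, -⟩; omega
          rw [if_neg hcondm]
          have hcondp : (0 ≤ (0 : Int) + 1 ∧ (0 : Int) + 1 < n ∧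
              PySem.List.pyGetD orig ((0 : Int) + 1) 0 = 0 ∧
              PySem.List.pyGetD orig (0 : Int) 0 = 2) :=
            ⟨by omega, by omega, by rw [hg1]; exact hnext.2, by rw [hg0]; exact h2⟩
          rw [if_pos hcondp]
          have hps1 : PySem.List.pySetD orig ((0 : Int) + 1) (PySem.List.pyGetD orig ((0 : Int) + 1) 0 + 1) =
              orig.set 1 1 := by
            rw [PySem.List.pySetD_of_nonneg _ _ (by omega), hg1, hnext.2]
            norm_num
          rw [hps1]
          have hgm : PySem.List.pyGetD (orig.set 1 1) (0 : Int) 0 = 2 := by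
            rw [PySem.List.pyGetD_of_nonneg _ _ (by omega)]
            have e : ((0 : Int)).toNat = 0 := rfl
            rw [e, pv_getD_set, if_neg (by omega)]
            rw [← hv0]
            exact h2
          rw [hgm, PySem.List.pySetD_of_nonneg _ _ (by omega)]
          norm_num
        rw [hA1]
        refine ⟨fun h1 => ?_, fun h1 => ?_, fun j hj => ?_, by simp⟩
        · constructor
          · rw [pv_getD_set, if_pos (by simp; omega), pvRes, if_pos ⟨h2, hnext.2⟩]
          · rw [pv_getD_set, if_neg (by omega), pv_getD_set, if_pos (by simp; omega),
              pvRes, if_pos ⟨h2, hnext.2⟩]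
        · exact absurd hnext.1 (by omega)
        · rw [pv_getD_set, if_neg (by omega), pv_getD_set, if_neg (by omega)]
      · -- donor but right neighbour absent or not needy: no change
        have hA1 : pvFA n orig 0 = orig := by
          unfold pvFA
          rw [if_pos (by rw [hg0]; exact h2)]
          simp only [List.foldl_cons, List.foldl_nil]
          have hcondm : ¬ (0 ≤ (0 : Int) + -1 ∧ (0 : Int) + -1 < n ∧
              PySem.List.pyGetD orig ((0 : Int) + -1) 0 = 0 ∧
              PySem.List.pyGetD orig (0 : Int) 0 = 2) := by
            rintro ⟨h, -⟩; omega
          rw [if_neg hcondm]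
          have hcondp : ¬ (0 ≤ (0 : Int) + 1 ∧ (0 : Int) + 1 < n ∧
              PySem.List.pyGetD orig ((0 : Int) + 1) 0 = 0 ∧
              PySem.List.pyGetD orig (0 : Int) 0 = 2) := by
            rintro ⟨-, hlt, hzz, -⟩
            rw [hg1] at hzz
            exact hnext ⟨by omega, hzz⟩
          rw [if_neg hcondp]
        rw [hA1]
        refine ⟨fun h1 => ?_, fun h1 => rfl, fun j hj => rfl, rfl⟩
        have hne : ¬ orig.getD 1 0 = 0 := fun h0 => hnext ⟨h1, h0⟩
        exact ⟨by rw [pvRes, if_neg (by rintro ⟨-, h⟩; exact hne h)],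
               by rw [pvRes, if_neg (by rintro ⟨-, h⟩; exact hne h)]⟩
    · -- not a donor: no change
      have hA1 : pvFA n orig 0 = orig := by
        unfold pvFA
        rw [if_neg (by rw [hg0]; exact h2)]
      rw [hA1]
      refine ⟨fun h1 => ?_, fun h1 => rfl, fun j hj => rfl, rfl⟩
      exact ⟨by rw [pvRes, if_neg (by rintro ⟨h, -⟩; exact h2 h)],
             by rw [pvRes, if_neg (by rintro ⟨h, -⟩; exact h2 h)]⟩

-- ===== VERDICT (by name: the statement is the Claim_ definition above) =====
theorem solution_spec : Claim_equal_solution := by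
  intro n lost reserve _hdom _hpre
  unfold Spec_solution
  rw [solution_unfold, solution_alt_unfold]
  exact pv_main n (pvInit n lost reserve) (pv_init_len n lost reserve)
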